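-- pv_equiv track=rewrite | github.com/inderpreet99/ios-contacts-to-csv | ios-contacts-to-csv.py | get_field_names
-- ===== SOURCE A (Python) =====
-- def get_field_names(contacts):
--     field_names = []
--     for contact in contacts:
--         if len(field_names) == 0:
--             field_names = list(contact.keys())
--         else:
--             for name in contact.keys():
--                 if name not in field_names:
--                     field_names.append(name)
--
--     return field_names
-- ===== SOURCE B (Python) =====
-- def get_field_names(contacts):
--     flat = [name for contact in contacts for name in contact.keys()]
--     return [name for i, name in enumerate(flat) if flat.index(name) == i]
-- ===== Notes on version B (the rewrite author's own statement) =====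
-- stated objective: alternative
-- what changed: Replaces A's growing-accumulator union (first-contact branch plus per-key membership scan against the partial result) with two staged passes: flatten all keys into one list, then select exactly the positions that are each name's first occurrence via flat.index(name) == i.
import Mathlib
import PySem

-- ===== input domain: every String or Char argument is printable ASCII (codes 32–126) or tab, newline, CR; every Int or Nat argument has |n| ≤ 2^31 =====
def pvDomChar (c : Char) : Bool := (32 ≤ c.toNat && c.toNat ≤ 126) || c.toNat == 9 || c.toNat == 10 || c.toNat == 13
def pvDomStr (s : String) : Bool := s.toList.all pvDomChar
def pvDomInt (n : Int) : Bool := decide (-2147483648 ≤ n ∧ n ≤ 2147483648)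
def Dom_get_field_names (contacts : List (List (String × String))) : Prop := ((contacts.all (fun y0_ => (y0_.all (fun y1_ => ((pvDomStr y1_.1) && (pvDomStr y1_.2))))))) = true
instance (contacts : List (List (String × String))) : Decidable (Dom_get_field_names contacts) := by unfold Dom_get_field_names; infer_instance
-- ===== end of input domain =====

-- B replaces A's growing-accumulator union (first-contact branch + membership scan against the
-- partial result) with two staged passes: flatten all keys, then keep the first-occurrence positions.

-- ===== PORT A =====
-- 'contact.keys()' for a contact given as an association list = keys of the Python dict it denotes
def pvKeysOf (contact : List (String × String)) : List String :=
  (PySem.Dict.ofList contact).keys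

def get_field_names (contacts : List (List (String × String))) : List String :=
  contacts.foldl
    (fun field_names contact =>
      if field_names.length = 0 then
        pvKeysOf contact
      else
        (pvKeysOf contact).foldl
          (fun field_names name =>
            if field_names.contains name then field_names else field_names ++ [name])
          field_names)
    []

-- ===== PORT B =====
def get_field_names_alt (contacts : List (List (String × String))) : List String :=
  let flat := contacts.flatMap pvKeysOf
  (PySem.List.enumerate flat 0).filterMap (fun p =>
    match PySem.List.index? flat p.2 with   -- flat.index(name); 'none' = ValueError, unreachable
    | some k => if (k : Int) = p.1 then some p.2 else none
    | none => none)

-- ===== PRECONDITION & SPEC =====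
def Spec_get_field_names (contacts : List (List (String × String))) (out : List String) : Prop := out = get_field_names_alt contacts
instance (contacts : List (List (String × String))) (out : List String) : Decidable (Spec_get_field_names contacts out) := by unfold Spec_get_field_names; infer_instance

-- ===== CLAIM (what is proved, stated in full; the proofs are below) =====
def Claim_equal_get_field_names : Prop := ∀ (contacts : List (List (String × String))), Dom_get_field_names contacts → Spec_get_field_names contacts (get_field_names contacts)

-- ===== LEMMAS AND PROOFS =====

-- A's inner loop (and the first-contact branch) is exactly set-update with the contact's keys
theorem pv_stepA_eq (fn : List String) (c : List (String × String)) :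
    (if fn.length = 0 then pvKeysOf c
     else (pvKeysOf c).foldl
       (fun field_names name =>
         if field_names.contains name then field_names else field_names ++ [name]) fn)
    = PySem.Set.update fn (pvKeysOf c) := by
  have hfold : ∀ (s : List String),
      (pvKeysOf c).foldl
        (fun field_names name =>
          if field_names.contains name then field_names else field_names ++ [name]) s
      = PySem.Set.update s (pvKeysOf c) := by
    intro s
    have : (fun (field_names : List String) (name : String) =>
        if field_names.contains name then field_names else field_names ++ [name])
        = (fun s x => PySem.Set.add s x) := by
      funext s x
      simp [PySem.Set.add]
    rw [this]
    rfl
  by_cases h : fn.length = 0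
  · have hnil : fn = [] := List.length_eq_zero_iff.mp h
    subst hnil
    rw [if_pos List.length_nil, PySem.Set.update_nil_left]
    exact (PySem.Set.ofList_eq_self_of_nodup _ (PySem.Dict.nodup_keys_ofList c)).symm
  · rw [if_neg h, hfold]

-- A's whole fold is set(flattened keys), in first-occurrence order
theorem pv_A_eq (contacts : List (List (String × String))) :
    get_field_names contacts = PySem.Set.ofList (contacts.flatMap pvKeysOf) := by
  unfold get_field_names
  have hstep : (fun (field_names : List String) (contact : List (String × String)) =>
      if field_names.length = 0 then pvKeysOf contact
      else (pvKeysOf contact).foldl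
        (fun field_names name =>
          if field_names.contains name then field_names else field_names ++ [name])
        field_names)
      = (fun s c => PySem.Set.update s (pvKeysOf c)) := by
    funext fn c
    exact pv_stepA_eq fn c
  rw [hstep]
  have : ∀ (cs : List (List (String × String))) (s : List String),
      cs.foldl (fun s c => PySem.Set.update s (pvKeysOf c)) s
      = PySem.Set.update s (cs.flatMap pvKeysOf) := by
    intro cs
    induction cs with
    | nil => intro s; rfl
    | cons c rest ih =>
      intro s
      simp only [List.foldl_cons, List.flatMap_cons, ih, PySem.Set.update_append]
  rw [this, PySem.Set.update_nil_left]

-- first-occurrence selection over the flat list is exactly set(flat)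
theorem pv_firstOcc (xs : List String) :
    (PySem.List.enumerate xs 0).filterMap (fun p =>
      match PySem.List.index? xs p.2 with
      | some k => if (k : Int) = p.1 then some p.2 else none
      | none => none)
    = PySem.Set.ofList xs := by
  induction xs using List.reverseRecOn with
  | nil => rfl
  | append_singleton l x ih =>
    rw [PySem.List.enumerate_append, List.filterMap_append, PySem.Set.ofList_append_singleton]
    -- prefix part: for p ∈ enumerate l 0, p.2 ∈ l so index? (l ++ [x]) p.2 = index? l p.2
    have hcongr :
        (PySem.List.enumerate l 0).filterMap (fun p =>
          match PySem.List.index? (l ++ [x]) p.2 with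
          | some k => if (k : Int) = p.1 then some p.2 else none
          | none => none)
        = (PySem.List.enumerate l 0).filterMap (fun p =>
          match PySem.List.index? l p.2 with
          | some k => if (k : Int) = p.1 then some p.2 else none
          | none => none) := by
      apply List.filterMap_congr
      intro p hp
      obtain ⟨k, hk, rfl⟩ := (PySem.List.mem_enumerate_iff _ _ _).mp hp
      have hmem : l[k] ∈ l := List.getElem_mem hk
      rw [PySem.List.index?_append_of_mem _ hmem]
    rw [hcongr, ih]
    -- last element: contributes [x] iff x ∉ l
    by_cases hx : x ∈ l
    · obtain ⟨k, hk⟩ := Option.isSome_iff_exists.mp ((PySem.List.index?_isSome_iff _ _).mpr hx)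
      have hlt : k < l.length := by
        obtain ⟨hk', _, _⟩ := PySem.List.getElem_of_index?_eq_some hk
        exact hk'
      have hidx : PySem.List.index? (l ++ [x]) x = some k := by
        rw [PySem.List.index?_append_of_mem _ hx, hk]
      have hne : ((k : Int) = ((0 : Int) + l.length)) = False := by
        simp only [eq_iff_iff, iff_false]
        intro h
        omega
      have hcontains : PySem.Set.contains (PySem.Set.ofList l) x = true := by
        simp [PySem.Set.contains, PySem.Set.mem_ofList, hx]
      simp only [PySem.List.enumerate_cons, PySem.List.enumerate_nil, List.filterMap_cons,
        List.filterMap_nil, hidx, hne, if_false, PySem.Set.add, hcontains, if_true]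
      simp
    · have hidx : PySem.List.index? (l ++ [x]) x = some l.length :=
        PySem.List.index?_append_singleton_self _ _ hx
      have hcontains : PySem.Set.contains (PySem.Set.ofList l) x = false := by
        simp [PySem.Set.contains, PySem.Set.mem_ofList, hx]
      simp only [PySem.List.enumerate_cons, PySem.List.enumerate_nil, List.filterMap_cons,
        List.filterMap_nil, hidx, PySem.Set.add, hcontains]
      simp

-- ===== VERDICT (by name: the statement is the Claim_ definition above) =====
theorem get_field_names_spec : Claim_equal_get_field_names := by
  intro contacts _
  unfold Spec_get_field_names get_field_names_alt
  rw [pv_A_eq, pv_firstOcc]
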